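-- pv_equiv track=rewrite | github.com/guige2023/rabai_autoclick | actions/data_matcher_action.py | _phonetic_hash
-- ===== SOURCE A (Python) =====
-- def _phonetic_hash(text: str) -> str:
--     """Generate phonetic hash (simplified Soundex)."""
--     text = text.upper()
--     soundex = text[0]
--
--     mapping = {
--         "BFPV": "1",
--         "CGJKQSXZ": "2",
--         "DT": "3",
--         "L": "4",
--         "MN": "5",
--         "R": "6",
--     }
--
--     prev_code = ""
--     for char in text[1:]:
--         for chars, code in mapping.items():
--             if char in chars:
--                 if code != prev_code:
--                     soundex += code
--                     prev_code = code
--                 break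
--
--     soundex = soundex[:4].ljust(4, "0")
--     return soundex
-- ===== SOURCE B (Python) =====
-- _TABLE_SRC = (("BFPV", "1"), ("CGJKQSXZ", "2"), ("DT", "3"),
--               ("L", "4"), ("MN", "5"), ("R", "6"))
--
--
-- class _DeleteMissing(dict):
--     """str.translate table that deletes every character it does not know."""
--     def __missing__(self, key):
--         return None
--
--
-- _TABLE = _DeleteMissing((ord(c), d) for chars, d in _TABLE_SRC for c in chars)
--
--
-- def _phonetic_hash(text: str) -> str:
--     text = text.upper()
--     out = text[0]
--     codes = text[1:].translate(_TABLE)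
--     while len(out) < 4 and codes:
--         d = codes[0]
--         out += d
--         codes = codes.lstrip(d)
--     return out.ljust(4, "0")
-- ===== Notes on version B (the rewrite author's own statement) =====
-- stated objective: faster
-- what changed: Replaces A's per-character Python state machine (prev_code threaded through a nested membership scan over the mapping groups) by a single C-level str.translate delete-or-map pass producing the whole digit string, followed by a run-stripping loop of at most 3 iterations (emit leading digit, lstrip its run, stop at 4 output chars).
-- outside the precondition, e.g. on _phonetic_hash(''): A raises IndexError, B raises IndexError
import Mathlib
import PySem

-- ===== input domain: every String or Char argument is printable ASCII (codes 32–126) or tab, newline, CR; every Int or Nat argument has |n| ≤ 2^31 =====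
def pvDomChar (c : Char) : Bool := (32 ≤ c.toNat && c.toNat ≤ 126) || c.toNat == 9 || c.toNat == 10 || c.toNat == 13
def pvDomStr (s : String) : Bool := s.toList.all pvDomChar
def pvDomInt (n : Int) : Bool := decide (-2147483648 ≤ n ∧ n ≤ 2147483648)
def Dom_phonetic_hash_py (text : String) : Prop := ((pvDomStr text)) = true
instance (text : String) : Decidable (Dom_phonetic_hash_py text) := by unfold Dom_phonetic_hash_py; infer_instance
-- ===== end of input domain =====

-- B replaces A's per-character state machine (prev_code threaded through a nested membership
-- scan) by a translate()-style delete-or-map pass producing the digit string and a short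
-- run-stripping loop (lstrip of the leading run, early exit at 4 output chars); the timing
-- run measured B faster by a constant factor.

-- ===== PORT A =====
-- the mapping dict, in insertion order; keys and values as lists of chars (Python strings)
def pvMappingA : List (List Char × List Char) :=
  [(['B','F','P','V'], ['1']), (['C','G','J','K','Q','S','X','Z'], ['2']),
   (['D','T'], ['3']), (['L'], ['4']), (['M','N'], ['5']), (['R'], ['6'])]

-- body of "for char in text[1:]": inner for over mapping.items() with break = find? of the
-- first group containing char; state = (soundex, prev_code)
def pvStepA (st : List Char × List Char) (ch : Char) : List Char × List Char :=
  match pvMappingA.find? (fun g => g.1.contains ch) with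
  | some (_, code) => if code ≠ st.2 then (st.1 ++ code, code) else st
  | none => st

-- soundex[:4].ljust(4, "0")
def pvLjust4 (l : List Char) : List Char := l ++ List.replicate (4 - l.length) '0'

def phonetic_hash_py (text : String) : String :=
  match (PySem.Str.upper text).toList with
  | [] => ""    -- Python raises IndexError on text[0] here; excluded by Pre_
  | c0 :: rest =>
      let st := rest.foldl pvStepA ([c0], [])
      String.ofList (pvLjust4 (st.1.take 4))

-- ===== PORT B =====
-- Source B's _TABLE: the char -> digit translate table (a dict keyed by code point); unknown
-- characters are deleted, so str.translate(_TABLE) is exactly filterMap of the lookup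
def pvTableB : PySem.Dict Char Char :=
  PySem.Dict.ofList
    [('B','1'),('F','1'),('P','1'),('V','1'),
     ('C','2'),('G','2'),('J','2'),('K','2'),('Q','2'),('S','2'),('X','2'),('Z','2'),
     ('D','3'),('T','3'),('L','4'),('M','5'),('N','5'),('R','6')]

-- the while loop: while len(out) < 4 and codes: out += codes[0]; codes = codes.lstrip(codes[0])
def pvStripLoop (out : List Char) (codes : List Char) : List Char :=
  if out.length < 4 then
    match codes with
    | [] => out
    | c :: cs => pvStripLoop (out ++ [c]) (cs.dropWhile (· == c))
  else out
termination_by codes.length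
decreasing_by
  simp only [List.length_cons]
  exact Nat.lt_succ_of_le (List.length_dropWhile_le _ _)

def phonetic_hash_py_alt (text : String) : String :=
  match (PySem.Str.upper text).toList with
  | [] => ""    -- Python raises IndexError on text[0] here; excluded by Pre_
  | c0 :: rest =>
      let codes := rest.filterMap (fun c => pvTableB.get? c)   -- text[1:].translate(_TABLE)
      let out := pvStripLoop [c0] codes
      String.ofList (out ++ List.replicate (4 - out.length) '0')  -- out.ljust(4, "0")

-- ===== PRECONDITION & SPEC =====
-- Python A raises IndexError on text[0] for the empty string; that is the only excluded input.
def Pre_phonetic_hash_py (text : String) : Prop := text ≠ ""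
instance (text : String) : Decidable (Pre_phonetic_hash_py text) := by unfold Pre_phonetic_hash_py; infer_instance
def pvWitness_phonetic_hash_py : String := "Robert"

def Spec_phonetic_hash_py (text : String) (out : String) : Prop := out = phonetic_hash_py_alt text
instance (text : String) (out : String) : Decidable (Spec_phonetic_hash_py text out) := by unfold Spec_phonetic_hash_py; infer_instance

-- ===== CLAIM (what is proved, stated in full; the proofs are below) =====
def Claim_equal_phonetic_hash_py : Prop := ∀ (text : String), Dom_phonetic_hash_py text → Pre_phonetic_hash_py text → Spec_phonetic_hash_py text (phonetic_hash_py text)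

-- ===== LEMMAS AND PROOFS =====

-- proof-side model: one representative per run of adjacent equal codes, with A's prev_code
def pvDedup : Option Char → List Char → List Char
  | _, [] => []
  | prev, c :: cs => if prev = some c then pvDedup prev cs else c :: pvDedup (some c) cs

-- A's prev_code string ("" initially, then a one-char code) as an Option Char run state
def pvPrevRep : Option Char → List Char
  | none => []
  | some d => [d]

-- A's inner loop-with-break agrees with B's table lookup
theorem pvStepA_eq (st : List Char × List Char) (ch : Char) :
    pvStepA st ch =
      match pvTableB.get? ch with
      | some d => if [d] ≠ st.2 then (st.1 ++ [d], [d]) else st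
      | none => st := by
  have hitems : pvTableB.items = [('B','1'),('F','1'),('P','1'),('V','1'),
     ('C','2'),('G','2'),('J','2'),('K','2'),('Q','2'),('S','2'),('X','2'),('Z','2'),
     ('D','3'),('T','3'),('L','4'),('M','5'),('N','5'),('R','6')] := by decide
  unfold pvStepA pvMappingA
  simp only [PySem.Dict.get?, hitems, List.find?, List.contains_cons, List.contains_nil]
  by_cases h0 : ch = 'B'
  · subst h0; rfl
  by_cases h1 : ch = 'F'
  · subst h1; rfl
  by_cases h2 : ch = 'P'
  · subst h2; rfl
  by_cases h3 : ch = 'V'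
  · subst h3; rfl
  by_cases h4 : ch = 'C'
  · subst h4; rfl
  by_cases h5 : ch = 'G'
  · subst h5; rfl
  by_cases h6 : ch = 'J'
  · subst h6; rfl
  by_cases h7 : ch = 'K'
  · subst h7; rfl
  by_cases h8 : ch = 'Q'
  · subst h8; rfl
  by_cases h9 : ch = 'S'
  · subst h9; rfl
  by_cases h10 : ch = 'X'
  · subst h10; rfl
  by_cases h11 : ch = 'Z'
  · subst h11; rfl
  by_cases h12 : ch = 'D'
  · subst h12; rfl
  by_cases h13 : ch = 'T'
  · subst h13; rfl
  by_cases h14 : ch = 'L'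
  · subst h14; rfl
  by_cases h15 : ch = 'M'
  · subst h15; rfl
  by_cases h16 : ch = 'N'
  · subst h16; rfl
  by_cases h17 : ch = 'R'
  · subst h17; rfl
  have e0 : (ch == 'B') = false := beq_eq_false_iff_ne.mpr h0
  have e1 : (ch == 'F') = false := beq_eq_false_iff_ne.mpr h1
  have e2 : (ch == 'P') = false := beq_eq_false_iff_ne.mpr h2
  have e3 : (ch == 'V') = false := beq_eq_false_iff_ne.mpr h3
  have e4 : (ch == 'C') = false := beq_eq_false_iff_ne.mpr h4
  have e5 : (ch == 'G') = false := beq_eq_false_iff_ne.mpr h5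
  have e6 : (ch == 'J') = false := beq_eq_false_iff_ne.mpr h6
  have e7 : (ch == 'K') = false := beq_eq_false_iff_ne.mpr h7
  have e8 : (ch == 'Q') = false := beq_eq_false_iff_ne.mpr h8
  have e9 : (ch == 'S') = false := beq_eq_false_iff_ne.mpr h9
  have e10 : (ch == 'X') = false := beq_eq_false_iff_ne.mpr h10
  have e11 : (ch == 'Z') = false := beq_eq_false_iff_ne.mpr h11
  have e12 : (ch == 'D') = false := beq_eq_false_iff_ne.mpr h12
  have e13 : (ch == 'T') = false := beq_eq_false_iff_ne.mpr h13
  have e14 : (ch == 'L') = false := beq_eq_false_iff_ne.mpr h14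
  have e15 : (ch == 'M') = false := beq_eq_false_iff_ne.mpr h15
  have e16 : (ch == 'N') = false := beq_eq_false_iff_ne.mpr h16
  have e17 : (ch == 'R') = false := beq_eq_false_iff_ne.mpr h17
  have f0 : ('B' == ch) = false := beq_eq_false_iff_ne.mpr (Ne.symm h0)
  have f1 : ('F' == ch) = false := beq_eq_false_iff_ne.mpr (Ne.symm h1)
  have f2 : ('P' == ch) = false := beq_eq_false_iff_ne.mpr (Ne.symm h2)
  have f3 : ('V' == ch) = false := beq_eq_false_iff_ne.mpr (Ne.symm h3)
  have f4 : ('C' == ch) = false := beq_eq_false_iff_ne.mpr (Ne.symm h4)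
  have f5 : ('G' == ch) = false := beq_eq_false_iff_ne.mpr (Ne.symm h5)
  have f6 : ('J' == ch) = false := beq_eq_false_iff_ne.mpr (Ne.symm h6)
  have f7 : ('K' == ch) = false := beq_eq_false_iff_ne.mpr (Ne.symm h7)
  have f8 : ('Q' == ch) = false := beq_eq_false_iff_ne.mpr (Ne.symm h8)
  have f9 : ('S' == ch) = false := beq_eq_false_iff_ne.mpr (Ne.symm h9)
  have f10 : ('X' == ch) = false := beq_eq_false_iff_ne.mpr (Ne.symm h10)
  have f11 : ('Z' == ch) = false := beq_eq_false_iff_ne.mpr (Ne.symm h11)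
  have f12 : ('D' == ch) = false := beq_eq_false_iff_ne.mpr (Ne.symm h12)
  have f13 : ('T' == ch) = false := beq_eq_false_iff_ne.mpr (Ne.symm h13)
  have f14 : ('L' == ch) = false := beq_eq_false_iff_ne.mpr (Ne.symm h14)
  have f15 : ('M' == ch) = false := beq_eq_false_iff_ne.mpr (Ne.symm h15)
  have f16 : ('N' == ch) = false := beq_eq_false_iff_ne.mpr (Ne.symm h16)
  have f17 : ('R' == ch) = false := beq_eq_false_iff_ne.mpr (Ne.symm h17)
  simp only [e0, e1, e2, e3, e4, e5, e6, e7, e8, e9, e10, e11, e12, e13, e14, e15, e16, e17, f0, f1, f2, f3, f4, f5, f6, f7, f8, f9, f10, f11, f12, f13, f14, f15, f16, f17]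
  rfl

theorem pvPrevRep_eq_iff (p : Option Char) (d : Char) : pvPrevRep p = [d] ↔ p = some d := by
  cases p <;> simp [pvPrevRep]

-- loop invariant for A: its fold = filter-map + run collapse
theorem pvFold_eq (rest : List Char) (acc : List Char) (p : Option Char) :
    (rest.foldl pvStepA (acc, pvPrevRep p)).1 =
      acc ++ pvDedup p (rest.filterMap (fun c => pvTableB.get? c)) := by
  induction rest generalizing acc p with
  | nil => simp [pvDedup]
  | cons c cs ih =>
      simp only [List.foldl_cons, List.filterMap_cons, pvStepA_eq]
      cases h : pvTableB.get? c with
      | none => exact ih acc p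
      | some d =>
          dsimp only
          by_cases hp : p = some d
          · subst hp
            rw [if_neg (by simp [pvPrevRep])]
            simpa [pvDedup] using ih acc (some d)
          · have hne : [d] ≠ pvPrevRep p := fun h' => hp ((pvPrevRep_eq_iff p d).mp h'.symm)
            rw [if_pos hne]
            have hih := ih (acc ++ [d]) (some d)
            simp only [pvPrevRep] at hih
            simp [pvDedup, hp, hih]

-- stripping the leading run of c is restarting the collapse after emitting c
theorem pvDedup_some_eq (c : Char) (cs : List Char) :
    pvDedup (some c) cs = pvDedup none (cs.dropWhile (· == c)) := by
  induction cs with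
  | nil => rfl
  | cons x xs ih =>
      by_cases h : x = c
      · subst h
        simpa [pvDedup, List.dropWhile] using ih
      · simp [pvDedup, List.dropWhile, Ne.symm h, beq_eq_false_iff_ne.mpr h, pvDedup]

-- loop invariant for B: the strip loop = take 4 of the collapsed code string
theorem pvStripLoop_eq (n : Nat) (codes : List Char) (out : List Char)
    (hn : codes.length ≤ n) (hout : out.length ≤ 4) :
    pvStripLoop out codes = (out ++ pvDedup none codes).take 4 := by
  induction n generalizing codes out with
  | zero =>
      have : codes = [] := List.eq_nil_of_length_eq_zero (Nat.le_zero.mp hn)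
      subst this
      unfold pvStripLoop
      simp [pvDedup, List.take_of_length_le hout]
  | succ n ih =>
      unfold pvStripLoop
      by_cases h4 : out.length < 4
      · rw [if_pos h4]
        cases codes with
        | nil => simp [pvDedup, List.take_of_length_le hout]
        | cons c cs =>
            change pvStripLoop (out ++ [c]) (cs.dropWhile (· == c)) = _
            have hlen : (cs.dropWhile (· == c)).length ≤ n := by
              have := List.length_dropWhile_le (· == c) cs
              simp only [List.length_cons] at hn
              omega
            rw [ih _ _ hlen (by simp; omega)]
            simp [pvDedup, pvDedup_some_eq]
      · rw [if_neg h4]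
        have : out.length = 4 := by omega
        rw [List.take_append_of_le_length (by omega), List.take_of_length_le (by omega)]

-- ===== VERDICT (by name: the statement is the Claim_ definition above) =====
theorem phonetic_hash_py_spec : Claim_equal_phonetic_hash_py := by
  unfold Claim_equal_phonetic_hash_py
  intro text _ hpre
  unfold Spec_phonetic_hash_py phonetic_hash_py phonetic_hash_py_alt
  cases h : (PySem.Str.upper text).toList with
  | nil =>
      exfalso
      apply hpre
      simp [PySem.Str.toList_upper, PySem.Chars.upper] at h
      exact String.ext (by simp [h])
  | cons c0 rest =>
      have hA := pvFold_eq rest [c0] none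
      simp only [pvPrevRep] at hA
      have hB := pvStripLoop_eq (rest.filterMap (fun c => pvTableB.get? c)).length
        (rest.filterMap (fun c => pvTableB.get? c)) [c0] (Nat.le_refl _) (by simp)
      simp only [hA, hB, pvLjust4]
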